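-- pv_equiv track=rewrite | github.com/TimHuisman1703/AdventOfCode | 2015/Day 15/aoc15_2.py | outcome
-- ===== SOURCE A (Python) =====
-- def outcome(attr, div):
--     total = 1
--     for i in range(4):
--         s = 0
--         for j in range(len(attr)):
--             s += div[j]*attr[j][i]
--         total *= max(0, s)
--     return total
-- ===== SOURCE B (Python) =====
-- def outcome(attr, div):
--     def sums(pairs):
--         if not pairs:
--             return (0, 0, 0, 0)
--         (row, d), rest = pairs[0], pairs[1:]
--         a, b, c, e = sums(rest)
--         return (a + d * row[0], b + d * row[1], c + d * row[2], e + d * row[3])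
--     a, b, c, e = sums(list(zip(attr, div)))
--     return max(0, a) * max(0, b) * max(0, c) * max(0, e)
-- ===== Notes on version B (the rewrite author's own statement) =====
-- stated objective: alternative
-- what changed: A makes four index-driven scans (one per attribute) with clamp-and-multiply interleaved; B is index-free: it zips ingredients with their amounts and recurses over that list once, building a 4-tuple of dot-products back-to-front, then clamps and multiplies at the end.
import Mathlib
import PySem

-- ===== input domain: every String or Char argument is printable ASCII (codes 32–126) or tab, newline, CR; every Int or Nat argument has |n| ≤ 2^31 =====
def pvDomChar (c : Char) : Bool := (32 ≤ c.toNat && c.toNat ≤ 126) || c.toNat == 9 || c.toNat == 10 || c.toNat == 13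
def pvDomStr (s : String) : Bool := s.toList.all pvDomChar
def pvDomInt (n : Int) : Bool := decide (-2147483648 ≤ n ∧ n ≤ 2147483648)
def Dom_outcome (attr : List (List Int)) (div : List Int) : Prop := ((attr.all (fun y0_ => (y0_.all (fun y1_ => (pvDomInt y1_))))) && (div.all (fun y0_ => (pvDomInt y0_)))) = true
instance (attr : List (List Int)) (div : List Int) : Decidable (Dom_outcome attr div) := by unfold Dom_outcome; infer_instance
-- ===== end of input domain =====

-- B replaces A's four index-driven scans by one index-free structural recursion over
-- the zipped (ingredient, amount) list building a 4-tuple of dot-products (alternative decomposition, same cost).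


-- ===== PORT A =====
def outcome (attr : List (List Int)) (div : List Int) : Int :=
  (PySem.List.pyRange 0 4 1).foldl (fun total i =>
    let s := (PySem.List.pyRange 0 (attr.length : Int) 1).foldl
      (fun s j => s + PySem.List.pyGetD div j 0 *
                      PySem.List.pyGetD (PySem.List.pyGetD attr j []) i 0) 0
    total * max 0 s) 1

-- ===== PORT B =====
-- structural recursion over the zipped list, as Source B's 'sums' (row[0..3] are in range under Pre_;
-- pyGetD is exact there)
def sums4 : List (List Int × Int) → Int × Int × Int × Int
  | [] => (0, 0, 0, 0)
  | (row, d) :: rest =>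
    let (a, b, c, e) := sums4 rest
    (a + d * PySem.List.pyGetD row 0 0, b + d * PySem.List.pyGetD row 1 0,
     c + d * PySem.List.pyGetD row 2 0, e + d * PySem.List.pyGetD row 3 0)

def outcome_alt (attr : List (List Int)) (div : List Int) : Int :=
  let (a, b, c, e) := sums4 (attr.zip div)
  max 0 a * max 0 b * max 0 c * max 0 e

-- ===== PRECONDITION & SPEC =====
-- Pre_ excludes exactly the inputs on which the Python raises IndexError:
-- div shorter than attr, or an ingredient row with fewer than 4 attributes.
def Pre_outcome (attr : List (List Int)) (div : List Int) : Prop :=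
  attr.length ≤ div.length ∧ ∀ row ∈ attr, 4 ≤ row.length
instance (attr : List (List Int)) (div : List Int) : Decidable (Pre_outcome attr div) := by
  unfold Pre_outcome; infer_instance
def pvWitness_outcome : List (List Int) × List Int := ([[1, 2, 3, 4], [0, -1, 2, 5]], [3, 2])

def Spec_outcome (attr : List (List Int)) (div : List Int) (out : Int) : Prop := out = outcome_alt attr div
instance (attr : List (List Int)) (div : List Int) (out : Int) : Decidable (Spec_outcome attr div out) := by unfold Spec_outcome; infer_instance

-- ===== CLAIM (what is proved, stated in full; the proofs are below) =====
def Claim_equal_outcome : Prop := ∀ (attr : List (List Int)) (div : List Int), Dom_outcome attr div → Pre_outcome attr div → Spec_outcome attr div (outcome attr div)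

-- ===== LEMMAS AND PROOFS =====

-- column-i dot-product of the two lists, recursively (truncates at the shorter list)
def dot (i : Int) : List (List Int) → List Int → Int
  | [], _ => 0
  | _, [] => 0
  | row :: ar, d :: dr => d * PySem.List.pyGetD row i 0 + dot i ar dr

-- A's inner fold is a sum over indices
def colSum (attr : List (List Int)) (div : List Int) (i : Int) (n : Nat) : Int :=
  ((List.range n).map (fun (j : Nat) =>
    PySem.List.pyGetD div (j : Int) 0 *
    PySem.List.pyGetD (PySem.List.pyGetD attr (j : Int) []) i 0)).sum

theorem foldl_add_colSum (attr : List (List Int)) (div : List Int) (i : Int) (n : Nat) :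
    (List.range n).foldl (fun s (j : Nat) => s + PySem.List.pyGetD div (j : Int) 0 *
        PySem.List.pyGetD (PySem.List.pyGetD attr (j : Int) []) i 0) 0
      = colSum attr div i n := by
  induction n with
  | zero => simp [colSum]
  | succ n ih =>
    rw [List.range_succ, List.foldl_append, ih]
    simp [colSum, List.range_succ]

theorem pyRange_nat (n : Nat) :
    PySem.List.pyRange 0 (n : Int) 1 = List.map (fun k : Nat => (k : Int)) (List.range n) := by
  have h : ((n : Int) - 0).toNat = n := by omega
  rw [PySem.List.pyRange_one, h]
  simp

theorem outcome_eq (attr : List (List Int)) (div : List Int) :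
    outcome attr div =
      ((((1 * max 0 (colSum attr div 0 attr.length)) * max 0 (colSum attr div 1 attr.length))
        * max 0 (colSum attr div 2 attr.length)) * max 0 (colSum attr div 3 attr.length)) := by
  have h4 : PySem.List.pyRange 0 4 1 = [0, 1, 2, 3] := by decide
  unfold outcome
  rw [h4, pyRange_nat]
  simp only [List.foldl_map, List.foldl_cons, List.foldl_nil]
  rw [foldl_add_colSum attr div 0, foldl_add_colSum attr div 1,
      foldl_add_colSum attr div 2, foldl_add_colSum attr div 3]

theorem pyGetD_cons_succ {A : Type} (x : A) (xs : List A) (j : Nat) (dflt : A) :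
    PySem.List.pyGetD (x :: xs) ((j : Int) + 1) dflt = PySem.List.pyGetD xs (j : Int) dflt := by
  rw [show ((j : Int) + 1) = (((j + 1 : Nat)) : Int) by push_cast; ring,
      PySem.List.pyGetD_natCast, PySem.List.pyGetD_natCast]
  rfl

-- index shift for the cons case of colSum
theorem colSum_cons (row : List Int) (ar : List (List Int)) (d : Int) (dr : List Int)
    (i : Int) (n : Nat) :
    colSum (row :: ar) (d :: dr) i (n + 1) = d * PySem.List.pyGetD row i 0 + colSum ar dr i n := by
  unfold colSum
  rw [List.range_succ_eq_map]
  simp only [List.map_cons, List.map_map, List.sum_cons, Function.comp_def]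
  congr 1
  · simp
  · congr 1
    apply List.map_congr_left
    intro j _
    simp [Nat.succ_eq_add_one, pyGetD_cons_succ]

theorem colSum_eq_dot (attr : List (List Int)) (div : List Int) (i : Int)
    (h : attr.length ≤ div.length) :
    colSum attr div i attr.length = dot i attr div := by
  induction attr generalizing div with
  | nil => simp [colSum, dot]
  | cons row ar ih =>
    cases div with
    | nil => simp at h
    | cons d dr =>
      simp only [List.length_cons] at h ⊢
      rw [colSum_cons, ih dr (by omega)]
      rfl

theorem sums4_eq_dot (attr : List (List Int)) (div : List Int) :
    sums4 (attr.zip div) = (dot 0 attr div, dot 1 attr div, dot 2 attr div, dot 3 attr div) := by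
  induction attr generalizing div with
  | nil => simp [sums4, dot]
  | cons row ar ih =>
    cases div with
    | nil => simp [sums4, dot]
    | cons d dr =>
      simp only [List.zip_cons_cons, sums4, ih dr, dot]
      ring_nf

-- ===== VERDICT (by name: the statement is the Claim_ definition above) =====
theorem outcome_spec : Claim_equal_outcome := by
  intro attr div _ hpre
  unfold Spec_outcome
  rw [outcome_eq]
  unfold outcome_alt
  rw [sums4_eq_dot,
      colSum_eq_dot attr div 0 hpre.1, colSum_eq_dot attr div 1 hpre.1,
      colSum_eq_dot attr div 2 hpre.1, colSum_eq_dot attr div 3 hpre.1]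
  ring
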